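-- pv_equiv track=rewrite | github.com/bhban/wgd-nextflow | scripts/rediploidisation/make_links.py | classify_species_set
-- ===== SOURCE A (Python) =====
-- from typing import Dict, Iterable, List, Sequence, Tuple
--
-- def branch_sort_key(branch_id: str) -> Tuple[int, str]:
--     """
--     Sort branch IDs numerically when possible, otherwise lexicographically.
--     """
--     try:
--         return (0, f"{int(branch_id):010d}")
--     except ValueError:
--         return (1, branch_id)
--
-- def classify_species_set(
--     species_set: set[str],
--     branch_to_species: Dict[str, set[str]]
-- ) -> str:
--     """
--     Return the smallest branch_id whose species set contains all species in
--     species_set.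
--     """
--     for branch_id in sorted(branch_to_species.keys(), key=branch_sort_key):
--         if species_set.issubset(branch_to_species[branch_id]):
--             return branch_id
--
--     raise ValueError(
--         "Species set did not match any branch definition: "
--         f"{','.join(sorted(species_set))}"
--     )
-- ===== SOURCE B (Python) =====
-- from typing import Dict, Tuple
--
-- def branch_sort_key(branch_id: str) -> Tuple[int, str]:
--     try:
--         return (0, f"{int(branch_id):010d}")
--     except ValueError:
--         return (1, branch_id)
--
-- def classify_species_set(
--     species_set: set[str],
--     branch_to_species: Dict[str, set[str]]
-- ) -> str:
--     # Single linear scan over the dict instead of sorting all keys first.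
--     best = None
--     best_key = None
--     for branch_id, members in branch_to_species.items():
--         if species_set.issubset(members):
--             k = branch_sort_key(branch_id)
--             if best_key is None or k < best_key:
--                 best, best_key = branch_id, k
--     if best is None:
--         raise ValueError(
--             "Species set did not match any branch definition: "
--             f"{','.join(sorted(species_set))}"
--         )
--     return best
-- ===== Notes on version B (the rewrite author's own statement) =====
-- stated objective: alternative
-- what changed: B replaces A's sort-all-keys-then-take-first-match with a single linear scan over the dict items that keeps the best (minimal sort key, earliest on ties) matching branch seen so far.
import Mathlib
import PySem

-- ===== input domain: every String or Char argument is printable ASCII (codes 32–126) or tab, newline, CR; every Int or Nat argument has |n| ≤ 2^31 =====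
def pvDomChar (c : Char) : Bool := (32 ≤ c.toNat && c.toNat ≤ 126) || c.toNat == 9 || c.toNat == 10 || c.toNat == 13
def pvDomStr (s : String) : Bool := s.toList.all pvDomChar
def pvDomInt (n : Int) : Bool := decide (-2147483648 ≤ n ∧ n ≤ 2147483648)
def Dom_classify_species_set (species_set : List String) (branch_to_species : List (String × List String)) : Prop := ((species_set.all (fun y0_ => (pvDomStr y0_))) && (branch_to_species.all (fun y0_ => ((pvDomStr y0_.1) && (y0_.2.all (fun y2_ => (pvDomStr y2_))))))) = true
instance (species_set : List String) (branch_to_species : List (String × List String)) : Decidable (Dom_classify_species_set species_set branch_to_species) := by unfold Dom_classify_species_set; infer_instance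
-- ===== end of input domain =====

-- B replaces A's sort-all-keys-then-first-match with one linear scan keeping the best matching
-- branch (minimal sort key, earliest on ties); same cost class, no speed claim (objective: alternative).

-- shared module helper: branch_sort_key (both Pythons call it)
-- f"{n:010d}": zero-pad str(n) to width 10, zeros after the sign
def pvPad10 (n : Int) : String :=
  let s := PySem.Int.toChars n
  if n < 0 then String.ofList ('-' :: List.replicate (10 - s.length) '0' ++ s.drop 1)
  else String.ofList (List.replicate (10 - s.length) '0' ++ s)

def pvBranchKey (b : String) : Int × String :=
  match PySem.Int.ofStr? b with
  | some n => (0, pvPad10 n)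
  | none => (1, b)

-- dict lookup d[k] on the association list (first match; keys of a real dict are distinct)
def pvLookup (d : List (String × List String)) (k : String) : List String :=
  match d.find? (fun p => p.1 == k) with
  | some p => p.2
  | none => []

-- species_set.issubset(t)
def pvSubset (s t : List String) : Bool := s.all (fun x => t.contains x)

-- ===== PORT A =====
def classify_species_set (species_set : List String) (branch_to_species : List (String × List String)) : String :=
  ((PySem.List.sorted2 (PySem.List.dedup (branch_to_species.map Prod.fst))
      (fun b => (pvBranchKey b).1) (fun b => (pvBranchKey b).2) false).find?
    (fun b => pvSubset species_set (pvLookup branch_to_species b))).getD ""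

-- ===== PORT B =====
-- Python tuple comparison k < best_key on (int, str)
def pvKeyLt (u v : Int × String) : Bool := decide (u.1 < v.1) || (decide (u.1 = v.1) && decide (u.2 < v.2))

def classify_species_set_alt (species_set : List String) (branch_to_species : List (String × List String)) : String :=
  match ((PySem.List.dedup (branch_to_species.map Prod.fst)).map
      (fun k => (k, pvLookup branch_to_species k))).foldl (fun best p =>
      if pvSubset species_set p.2 then
        match best with
        | none => some (p.1, pvBranchKey p.1)
        | some q => if pvKeyLt (pvBranchKey p.1) q.2 then some (p.1, pvBranchKey p.1) else some q
      else best) none with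
  | some q => q.1
  | none => ""

-- ===== PRECONDITION & SPEC =====
-- Pre_ excludes exactly the inputs where no branch's species set covers species_set: there Python A raises ValueError (B raises the same).
def Pre_classify_species_set (species_set : List String) (branch_to_species : List (String × List String)) : Prop :=
  ∃ p ∈ branch_to_species, pvSubset species_set (pvLookup branch_to_species p.1) = true
instance (species_set : List String) (branch_to_species : List (String × List String)) : Decidable (Pre_classify_species_set species_set branch_to_species) := by unfold Pre_classify_species_set; infer_instance

def pvWitness_classify_species_set : List String × (List (String × List String)) :=
  (["a"], [("1", ["a", "b"]), ("x", ["a"])])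

def Spec_classify_species_set (species_set : List String) (branch_to_species : List (String × List String)) (out : String) : Prop := out = classify_species_set_alt species_set branch_to_species
instance (species_set : List String) (branch_to_species : List (String × List String)) (out : String) : Decidable (Spec_classify_species_set species_set branch_to_species out) := by unfold Spec_classify_species_set; infer_instance

-- ===== CLAIM (what is proved, stated in full; the proofs are below) =====
def Claim_equal_classify_species_set : Prop := ∀ (species_set : List String) (branch_to_species : List (String × List String)), Dom_classify_species_set species_set branch_to_species → Pre_classify_species_set species_set branch_to_species → Spec_classify_species_set species_set branch_to_species (classify_species_set species_set branch_to_species)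

-- ===== LEMMAS AND PROOFS =====

-- the comparison sorted2 uses internally, specialised to our key
def pvLtp (u v : Int × String) : Bool :=
  decide (u.1 < v.1) || (!decide (v.1 < u.1) && decide (u.2 < v.2))

def pvLt (a b : String) : Bool := pvLtp (pvBranchKey a) (pvBranchKey b)

theorem pvLtp_iff (u v : Int × String) :
    pvLtp u v = true ↔ (u.1 < v.1 ∨ (u.1 = v.1 ∧ u.2 < v.2)) := by
  simp only [pvLtp, Bool.or_eq_true, Bool.and_eq_true, Bool.not_eq_true',
    decide_eq_true_eq, decide_eq_false_iff_not]
  constructor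
  · rintro (h | ⟨h1, h2⟩)
    · exact Or.inl h
    · by_cases h3 : u.1 < v.1
      · exact Or.inl h3
      · exact Or.inr ⟨by omega, h2⟩
  · rintro (h | ⟨h1, h2⟩)
    · exact Or.inl h
    · exact Or.inr ⟨by omega, h2⟩

theorem pvKeyLt_eq_ltp (u v : Int × String) : pvKeyLt u v = pvLtp u v := by
  cases hr : pvLtp u v with
  | true =>
    rcases (pvLtp_iff u v).mp hr with h | ⟨h1, h2⟩
    · simp [pvKeyLt, h]
    · simp [pvKeyLt, h1]
      simpa using h2
  | false =>
    have hn : ¬ (u.1 < v.1 ∨ (u.1 = v.1 ∧ u.2 < v.2)) := fun hc =>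
      by rw [(pvLtp_iff u v).mpr hc] at hr; cases hr
    push Not at hn
    simp only [pvKeyLt, Bool.or_eq_false_iff, Bool.and_eq_false_iff]
    refine ⟨by simp [hn.1], ?_⟩
    by_cases he : u.1 = v.1
    · exact Or.inr (by simp [not_lt.mpr (hn.2 he)])
    · exact Or.inl (by simp [he])

theorem pvLtp_asymm {u v : Int × String} (h : pvLtp u v = true) : pvLtp v u = false := by
  rw [pvLtp_iff] at h
  rw [Bool.eq_false_iff]
  intro hc
  rw [pvLtp_iff] at hc
  rcases h with h | ⟨h1, h2⟩ <;> rcases hc with g | ⟨g1, g2⟩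
  · omega
  · omega
  · omega
  · exact absurd g2 (lt_asymm h2)

theorem pvLtp_trans {u v w : Int × String} (h1 : pvLtp u v = true) (h2 : pvLtp v w = true) :
    pvLtp u w = true := by
  rw [pvLtp_iff] at h1 h2 ⊢
  rcases h1 with h | ⟨ha, hb⟩ <;> rcases h2 with g | ⟨gc, gd⟩
  · exact Or.inl (by omega)
  · exact Or.inl (by omega)
  · exact Or.inl (by omega)
  · exact Or.inr ⟨by omega, lt_trans hb gd⟩

theorem pvLtp_of_lt_of_not_lt {u v w : Int × String} (h1 : pvLtp u v = true)
    (h2 : pvLtp w v = false) : pvLtp u w = true := by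
  rw [pvLtp_iff] at h1 ⊢
  have hn : ¬ (w.1 < v.1 ∨ (w.1 = v.1 ∧ w.2 < v.2)) := fun hc =>
    by rw [(pvLtp_iff w v).mpr hc] at h2; cases h2
  push Not at hn
  obtain ⟨hna, hnb⟩ := hn
  rcases h1 with h | ⟨ha, hb⟩
  · exact Or.inl (by omega)
  · by_cases hw : u.1 < w.1
    · exact Or.inl hw
    · have he : w.1 = v.1 := by omega
      exact Or.inr ⟨by omega, lt_of_lt_of_le hb (hnb he)⟩

-- sorted2 with our key IS the insertion-sort fold with pvLt
theorem sorted2_eq (ks : List String) :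
    PySem.List.sorted2 ks (fun b => (pvBranchKey b).1) (fun b => (pvBranchKey b).2) false
      = ks.foldl (fun acc x => PySem.List.insertBy pvLt x acc) [] := rfl

theorem pairwise_insertBy (x : String) :
    ∀ ys : List String, ys.Pairwise (fun p q => pvLt q p = false) →
      (PySem.List.insertBy pvLt x ys).Pairwise (fun p q => pvLt q p = false) := by
  intro ys
  induction ys with
  | nil => intro _; simp [PySem.List.insertBy]
  | cons y t ih =>
    intro hp
    obtain ⟨hy, ht⟩ := List.pairwise_cons.mp hp
    simp only [PySem.List.insertBy]
    cases hxy : pvLt x y with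
    | false =>
      rw [if_neg Bool.false_ne_true]
      refine List.pairwise_cons.mpr ⟨?_, ih ht⟩
      intro z hz
      rcases (PySem.List.mem_insertBy pvLt x z t).mp hz with hzx | hzt
      · rw [hzx]; exact hxy
      · exact hy z hzt
    | true =>
      rw [if_pos rfl]
      refine List.pairwise_cons.mpr ⟨?_, hp⟩
      intro z hz
      rcases List.mem_cons.mp hz with hzy | hzt
      · rw [hzy]; exact pvLtp_asymm hxy
      · cases hzx : pvLt z x with
        | false => rfl
          | true =>
          have : pvLt z y = true := pvLtp_trans hzx hxy
          rw [hy z hzt] at this; cases this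

theorem sorted_fold_pairwise (ks : List String) :
    (ks.foldl (fun acc x => PySem.List.insertBy pvLt x acc) []).Pairwise
      (fun p q => pvLt q p = false) := by
  induction ks using List.reverseRecOn with
  | nil => simp
  | append_singleton ks x ih =>
    rw [List.foldl_append, List.foldl_cons, List.foldl_nil]
    exact pairwise_insertBy x _ ih

theorem find?_insertBy (P : String → Bool) (x : String) :
    ∀ ys : List String, ys.Pairwise (fun p q => pvLt q p = false) →
    (PySem.List.insertBy pvLt x ys).find? P =
      match ys.find? P with
      | none => if P x then some x else none
      | some b => if P x && pvLt x b then some x else some b := by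
  intro ys
  induction ys with
  | nil =>
    intro _
    simp only [PySem.List.insertBy, List.find?]
    cases hPx : P x <;> simp
  | cons y t ih =>
    intro hp
    obtain ⟨hy, ht⟩ := List.pairwise_cons.mp hp
    simp only [PySem.List.insertBy]
    cases hxy : pvLt x y with
    | true =>
      rw [if_pos rfl]
      cases hPx : P x with
      | true =>
        rw [List.find?_cons_of_pos hPx]
        cases hf : (y :: t).find? P with
        | none => simp
        | some b =>
          have hb : b ∈ y :: t := List.mem_of_find?_eq_some hf
          have hxb : pvLt x b = true := by
            rcases List.mem_cons.mp hb with hby | hbt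
            · rw [hby]; exact hxy
            · exact pvLtp_of_lt_of_not_lt hxy (hy b hbt)
          simp [hxb]
      | false =>
        rw [List.find?_cons_of_neg (by simp [hPx])]
        cases hf : (y :: t).find? P with
        | none => simp
        | some b => simp
    | false =>
      rw [if_neg Bool.false_ne_true]
      cases hPy : P y with
      | true =>
        rw [List.find?_cons_of_pos hPy, List.find?_cons_of_pos hPy]
        cases hPx : P x <;> simp [hxy]
      | false =>
        rw [List.find?_cons_of_neg (by simp [hPy]), List.find?_cons_of_neg (by simp [hPy])]
        exact ih ht

-- B's scan over the items equals "first match of the stable sort", paired with its key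
theorem scan_eq_find (species_set : List String) (branch_to_species : List (String × List String))
    (ks : List String) :
    ((ks.map (fun k => (k, pvLookup branch_to_species k))).foldl (fun best p =>
        if pvSubset species_set p.2 then
          match best with
          | none => some (p.1, pvBranchKey p.1)
          | some q => if pvKeyLt (pvBranchKey p.1) q.2 then some (p.1, pvBranchKey p.1) else some q
        else best) none)
      = ((ks.foldl (fun acc x => PySem.List.insertBy pvLt x acc) []).find?
          (fun b => pvSubset species_set (pvLookup branch_to_species b))).map
          (fun c => (c, pvBranchKey c)) := by
  induction ks using List.reverseRecOn with
  | nil => rfl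
  | append_singleton ks x ih =>
    rw [List.map_append, List.foldl_append, List.foldl_append, ih]
    rw [List.foldl_cons, List.foldl_nil, List.map_cons, List.map_nil,
      List.foldl_cons, List.foldl_nil]
    rw [find?_insertBy _ x _ (sorted_fold_pairwise ks)]
    cases hf : (ks.foldl (fun acc x => PySem.List.insertBy pvLt x acc) []).find?
        (fun b => pvSubset species_set (pvLookup branch_to_species b)) with
    | none =>
      cases hPx : pvSubset species_set (pvLookup branch_to_species x) <;> simp
    | some b =>
      cases hPx : pvSubset species_set (pvLookup branch_to_species x) with
      | false => simp
      | true =>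
        simp only [Option.map_some, if_pos, Bool.true_and]
        rw [pvKeyLt_eq_ltp]
        cases hlt : pvLt x b <;> simp_all [pvLt]

-- ===== VERDICT (by name: the statement is the Claim_ definition above) =====
theorem classify_species_set_spec : Claim_equal_classify_species_set := by
  intro species_set branch_to_species _ _
  unfold Spec_classify_species_set classify_species_set classify_species_set_alt
  rw [sorted2_eq, scan_eq_find]
  cases hf : ((PySem.List.dedup (branch_to_species.map Prod.fst)).foldl
      (fun acc x => PySem.List.insertBy pvLt x acc) []).find?
      (fun b => pvSubset species_set (pvLookup branch_to_species b)) <;> simp
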